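-- pv_equiv track=rewrite | github.com/jacobmentalconstruct/_AgenticToolKIT | src/lib/text_workspace.py | newline_style
-- ===== SOURCE A (Python) =====
-- def newline_style(text: str) -> str:
--     crlf = text.count("\r\n")
--     lf = text.count("\n") - crlf
--     cr = text.count("\r") - crlf
--     styles = sum(1 for count in [crlf, lf, cr] if count > 0)
--     if styles > 1:
--         return "mixed"
--     if crlf:
--         return "crlf"
--     if lf:
--         return "lf"
--     if cr:
--         return "cr"
--     return "none"
-- ===== SOURCE B (Python) =====
-- def newline_style(text: str) -> str:
--     crlf = lf = cr = 0
--     i = 0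
--     n = len(text)
--     while i < n:
--         c = text[i]
--         if c == '\r':
--             if i + 1 < n and text[i + 1] == '\n':
--                 crlf += 1
--                 i += 2
--                 continue
--             cr += 1
--         elif c == '\n':
--             lf += 1
--         i += 1
--     styles = (crlf > 0) + (lf > 0) + (cr > 0)
--     if styles > 1:
--         return "mixed"
--     if crlf:
--         return "crlf"
--     if lf:
--         return "lf"
--     if cr:
--         return "cr"
--     return "none"
-- ===== Notes on version B (the rewrite author's own statement) =====
-- stated objective: alternative
-- what changed: Replaces the three str.count scans plus subtraction arithmetic with a single left-to-right indexed pass that classifies each newline (CRLF with lookahead, lone CR, lone LF) directly into three counters.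
import Mathlib
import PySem

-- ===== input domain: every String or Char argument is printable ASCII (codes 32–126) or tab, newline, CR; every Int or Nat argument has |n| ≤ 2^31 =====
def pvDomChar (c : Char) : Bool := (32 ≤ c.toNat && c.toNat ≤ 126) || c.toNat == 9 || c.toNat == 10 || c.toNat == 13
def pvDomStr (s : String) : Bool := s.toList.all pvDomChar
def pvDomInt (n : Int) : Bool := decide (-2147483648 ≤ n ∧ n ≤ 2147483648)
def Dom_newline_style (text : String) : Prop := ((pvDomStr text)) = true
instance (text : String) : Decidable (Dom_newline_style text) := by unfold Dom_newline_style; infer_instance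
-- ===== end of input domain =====

-- B replaces A's three str.count scans with one left-to-right pass classifying each newline directly (alternative decomposition, same cost).


-- ===== PORT A =====
def newline_style (text : String) : String :=
  let crlf : Int := (PySem.Str.count text "\r\n" : Int)
  let lf : Int := (PySem.Str.count text "\n" : Int) - crlf
  let cr : Int := (PySem.Str.count text "\r" : Int) - crlf
  let styles : Int := [crlf, lf, cr].foldl (fun a count => if count > 0 then a + 1 else a) 0
  if styles > 1 then "mixed"
  else if crlf ≠ 0 then "crlf"
  else if lf ≠ 0 then "lf"
  else if cr ≠ 0 then "cr"
  else "none"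

-- ===== PORT B =====
-- B's while loop over positions: at '\r' it looks one character ahead and advances by 2 on "\r\n";
-- consuming the text left to right = structural recursion on the remaining characters, state (crlf, lf, cr).
def pvScanNL : List Char → Nat × Nat × Nat
  | [] => (0, 0, 0)
  | '\r' :: '\n' :: rest => ((pvScanNL rest).1 + 1, (pvScanNL rest).2.1, (pvScanNL rest).2.2)
  | '\r' :: rest => ((pvScanNL rest).1, (pvScanNL rest).2.1, (pvScanNL rest).2.2 + 1)
  | '\n' :: rest => ((pvScanNL rest).1, (pvScanNL rest).2.1 + 1, (pvScanNL rest).2.2)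
  | _ :: rest => pvScanNL rest

def newline_style_alt (text : String) : String :=
  let p := pvScanNL text.toList
  let crlf := p.1
  let lf := p.2.1
  let cr := p.2.2
  let styles := (if crlf > 0 then 1 else 0) + (if lf > 0 then 1 else 0) + (if cr > 0 then 1 else 0)
  if styles > 1 then "mixed"
  else if crlf > 0 then "crlf"
  else if lf > 0 then "lf"
  else if cr > 0 then "cr"
  else "none"

-- ===== PRECONDITION & SPEC =====
def Spec_newline_style (text : String) (out : String) : Prop := out = newline_style_alt text
instance (text : String) (out : String) : Decidable (Spec_newline_style text out) := by unfold Spec_newline_style; infer_instance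

-- ===== CLAIM (what is proved, stated in full; the proofs are below) =====
def Claim_equal_newline_style : Prop := ∀ (text : String), Dom_newline_style text → Spec_newline_style text (newline_style text)

-- ===== LEMMAS AND PROOFS =====

-- a two-character needle fails to match when its first character differs from the head
theorem pv_prefix2_false_head (x y a : Char) (t : List Char) (h : x ≠ a) :
    List.isPrefixOf [x, y] (a :: t) = false := by
  simp only [List.isPrefixOf, Bool.and_eq_false_iff]
  left
  exact beq_eq_false_iff_ne.mpr h

-- a two-character needle fails to match when its second character differs
theorem pv_prefix2_false_snd (x y b : Char) (r : List Char) (h : y ≠ b) :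
    List.isPrefixOf [x, y] (x :: b :: r) = false := by
  simp only [List.isPrefixOf, Bool.and_eq_false_iff]
  right; left
  exact beq_eq_false_iff_ne.mpr h

theorem pv_prefix1 (y a : Char) (t : List Char) :
    List.isPrefixOf [y] (a :: t) = (y == a) := by
  simp [List.isPrefixOf]

-- a two-character needle matches when both characters match
theorem pv_prefix2_true (x y : Char) (r : List Char) :
    List.isPrefixOf [x, y] (x :: y :: r) = true := by
  simp [List.isPrefixOf]

-- pvScanNL on a '\r' NOT followed by '\n': a lone CR.
theorem pv_scan_cr_cons (b : Char) (r : List Char) (hb : b ≠ '\n') :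
    pvScanNL ('\r' :: b :: r) =
      ((pvScanNL (b :: r)).1, (pvScanNL (b :: r)).2.1, (pvScanNL (b :: r)).2.2 + 1) := by
  rw [pvScanNL.eq_def]
  split
  next heq => exact absurd heq (by simp)
  next rest heq =>
    simp only [List.cons_eq_cons] at heq
    exact absurd heq.2.1 hb
  next rest hnx heq =>
    simp only [List.cons_eq_cons] at heq
    rw [← heq.2]
  next rest heq =>
    simp only [List.cons_eq_cons] at heq
    exact absurd heq.1 (by decide)
  next xc hl r2 h1 h2 heq =>
    simp only [List.cons_eq_cons] at heq
    exact absurd heq.1.symm h1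

-- pvScanNL skips a character that is neither '\r' nor '\n'.
theorem pv_scan_other (a : Char) (t : List Char) (h1 : a ≠ '\r') (h2 : a ≠ '\n') :
    pvScanNL (a :: t) = pvScanNL t := by
  rw [pvScanNL.eq_def]
  split
  next heq => exact absurd heq (by simp)
  next rest heq =>
    simp only [List.cons_eq_cons] at heq
    exact absurd heq.1 h1
  next rest hnx heq =>
    simp only [List.cons_eq_cons] at heq
    exact absurd heq.1 h1
  next rest heq =>
    simp only [List.cons_eq_cons] at heq
    exact absurd heq.1 h2
  next xc hl r2 hh1 hh2 heq =>
    simp only [List.cons_eq_cons] at heq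
    rw [heq.2]

-- pvScanNL on '\n': a lone LF.
theorem pv_scan_lf_cons (t : List Char) :
    pvScanNL ('\n' :: t) = ((pvScanNL t).1, (pvScanNL t).2.1 + 1, (pvScanNL t).2.2) := by
  rw [pvScanNL.eq_def]
  split
  next heq => exact absurd heq (by simp)
  next rest heq =>
    simp only [List.cons_eq_cons] at heq
    exact absurd heq.1 (by decide)
  next rest hnx heq =>
    simp only [List.cons_eq_cons] at heq
    exact absurd heq.1 (by decide)
  next rest heq =>
    simp only [List.cons_eq_cons] at heq
    rw [← heq.2]
  next xc hl r2 hh1 hh2 heq =>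
    simp only [List.cons_eq_cons] at heq
    exact absurd heq.1.symm hh2

-- crlf + lf accounts for every '\n' of the text.
theorem pv_scan_lf (s : List Char) : (pvScanNL s).1 + (pvScanNL s).2.1 = s.count '\n' := by
  fun_induction pvScanNL s <;> simp_all <;> omega

-- crlf + cr accounts for every '\r' of the text.
theorem pv_scan_cr (s : List Char) : (pvScanNL s).1 + (pvScanNL s).2.2 = s.count '\r' := by
  fun_induction pvScanNL s <;> simp_all <;> omega

-- count.go with a one-character needle counts occurrences of that character.
theorem pv_go_single (ch : Char) : ∀ (fuel : Nat) (s : List Char) (acc : Nat),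
    s.length ≤ fuel → PySem.Chars.count.go [ch] fuel s acc = acc + s.count ch := by
  intro fuel
  induction fuel with
  | zero =>
    intro s acc h
    cases s with
    | nil => simp [PySem.Chars.count.go]
    | cons a t => simp at h
  | succ f ih =>
    intro s acc h
    cases s with
    | nil => simp [PySem.Chars.count.go]
    | cons a t =>
      simp only [List.length_cons, Nat.succ_le_succ_iff] at h
      rw [PySem.Chars.count.go]
      rw [pv_prefix1]
      by_cases hc : ch = a
      · rw [beq_iff_eq.mpr hc]
        simp only [if_true]
        rw [show List.drop ([ch].length) (a :: t) = t by simp]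
        rw [ih t (acc + 1) h]
        have : (a :: t).count ch = t.count ch + 1 := by
          rw [List.count_cons]
          simp [hc.symm]
        rw [this]
        omega
      · rw [beq_eq_false_iff_ne.mpr hc]
        simp only [Bool.false_eq_true, if_false]
        rw [ih t acc h]
        have : (a :: t).count ch = t.count ch := by
          rw [List.count_cons]
          simp
          exact fun hh => absurd hh.symm hc
        rw [this]

-- count.go with the needle "\r\n" counts exactly the CRLF pairs pvScanNL finds.
theorem pv_go_crlf : ∀ (fuel : Nat) (s : List Char) (acc : Nat),
    s.length ≤ fuel → PySem.Chars.count.go ['\r', '\n'] fuel s acc = acc + (pvScanNL s).1 := by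
  intro fuel
  induction fuel with
  | zero =>
    intro s acc h
    cases s with
    | nil => simp [PySem.Chars.count.go, pvScanNL]
    | cons a t => simp at h
  | succ f ih =>
    intro s acc h
    cases s with
    | nil => simp [PySem.Chars.count.go, pvScanNL]
    | cons a t =>
      simp only [List.length_cons, Nat.succ_le_succ_iff] at h
      rw [PySem.Chars.count.go]
      by_cases ha : a = '\r'
      · subst ha
        cases t with
        | nil =>
          rw [show List.isPrefixOf ['\r', '\n'] ['\r'] = false by decide]
          simp only [Bool.false_eq_true, if_false]
          rw [ih [] acc (by simp)]
          simp [pvScanNL]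
        | cons b r =>
          by_cases hb : b = '\n'
          · subst hb
            rw [pv_prefix2_true '\r' '\n' r]
            simp only [if_true]
            rw [show List.drop (['\r', '\n'].length) ('\r' :: '\n' :: r) = r by simp]
            rw [ih r (acc + 1) (by simp at h ⊢; omega)]
            rw [show pvScanNL ('\r' :: '\n' :: r) =
              ((pvScanNL r).1 + 1, (pvScanNL r).2.1, (pvScanNL r).2.2) from rfl]
            omega
          · rw [pv_prefix2_false_snd '\r' '\n' b r (fun hh => hb hh.symm)]
            simp only [Bool.false_eq_true, if_false]
            rw [ih (b :: r) acc h]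
            rw [pv_scan_cr_cons b r hb]
      · rw [pv_prefix2_false_head '\r' '\n' a t (fun hh => ha hh.symm)]
        simp only [Bool.false_eq_true, if_false]
        rw [ih t acc h]
        by_cases ha2 : a = '\n'
        · subst ha2
          rw [pv_scan_lf_cons]
        · rw [pv_scan_other a t ha ha2]

theorem pv_count_single (s : List Char) (ch : Char) :
    PySem.Chars.count s [ch] = s.count ch := by
  unfold PySem.Chars.count
  simp only [List.isEmpty_cons, Bool.false_eq_true, if_false]
  simpa using pv_go_single ch s.length s 0 le_rfl

theorem pv_count_crlf (s : List Char) :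
    PySem.Chars.count s ['\r', '\n'] = (pvScanNL s).1 := by
  unfold PySem.Chars.count
  simp only [List.isEmpty_cons, Bool.false_eq_true, if_false]
  simpa using pv_go_crlf s.length s 0 le_rfl

-- ===== VERDICT (by name: the statement is the Claim_ definition above) =====
theorem newline_style_spec : Claim_equal_newline_style := by
  intro text _
  unfold Spec_newline_style newline_style newline_style_alt
  have h1 : PySem.Str.count text "\r\n" = (pvScanNL text.toList).1 := by
    rw [PySem.Str.count_eq]; exact pv_count_crlf _
  have h2 : PySem.Str.count text "\n" = text.toList.count '\n' := by
    rw [PySem.Str.count_eq]; exact pv_count_single _ _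
  have h3 : PySem.Str.count text "\r" = text.toList.count '\r' := by
    rw [PySem.Str.count_eq]; exact pv_count_single _ _
  have h4 := pv_scan_lf text.toList
  have h5 := pv_scan_cr text.toList
  rcases hp : pvScanNL text.toList with ⟨a, b, c⟩
  rw [hp] at h1 h4 h5
  simp only [h1, h2, h3, ← h4, ← h5, List.foldl]
  have e1 : ((a + b : Nat) : Int) - (a : Int) = (b : Int) := by push_cast; ring
  have e2 : ((a + c : Nat) : Int) - (a : Int) = (c : Int) := by push_cast; ring
  simp only [e1, e2, Int.natCast_pos, ne_eq, Nat.cast_eq_zero]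
  by_cases ha : a = 0 <;> by_cases hb : b = 0 <;> by_cases hc : c = 0 <;>
    simp [ha, hb, hc, Nat.pos_iff_ne_zero]
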